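-- pv_equiv track=rewrite | github.com/sunkusun9/ml-labs | mllabs/col.py | get_origin_var
-- ===== SOURCE A (Python) =====
-- def get_origin_var(columns, org_X):
--     l = list()
--     for col in columns:
--         suffix = col.split('__', 1)[-1]
--         org = "Unknown"
--         for org_var in org_X:
--             if suffix.startswith(f'{org_var}_') or suffix == org_var:
--                 org = org_var
--                 break
--         l.append(org)
--     return l
-- ===== SOURCE B (Python) =====
-- def _resolve(suffix, org_X, idx):
--     cands = [suffix[:i] for i, ch in enumerate(suffix) if ch == '_']
--     cands.append(suffix)
--     hits = [idx[c] for c in cands if c in idx]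
--     return org_X[min(hits)] if hits else 'Unknown'
--
--
-- def get_origin_var(columns, org_X):
--     # Index each original variable by its first position in org_X (built once),
--     # then for each column enumerate the underscore-boundary prefixes of its
--     # suffix and pick the candidate whose original variable comes first.
--     idx = {}
--     for i, v in enumerate(org_X):
--         if v not in idx:
--             idx[v] = i
--     return [_resolve(col.split('__', 1)[-1], org_X, idx) for col in columns]
-- ===== Notes on version B (the rewrite author's own statement) =====
-- stated objective: faster
-- what changed: A rescans the whole org_X list per column testing each variable as a prefix; B builds a first-occurrence index of org_X once, enumerates each suffix's underscore-boundary prefixes as the only possible matches, and returns the candidate whose original variable comes first in org_X.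
import Mathlib
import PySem

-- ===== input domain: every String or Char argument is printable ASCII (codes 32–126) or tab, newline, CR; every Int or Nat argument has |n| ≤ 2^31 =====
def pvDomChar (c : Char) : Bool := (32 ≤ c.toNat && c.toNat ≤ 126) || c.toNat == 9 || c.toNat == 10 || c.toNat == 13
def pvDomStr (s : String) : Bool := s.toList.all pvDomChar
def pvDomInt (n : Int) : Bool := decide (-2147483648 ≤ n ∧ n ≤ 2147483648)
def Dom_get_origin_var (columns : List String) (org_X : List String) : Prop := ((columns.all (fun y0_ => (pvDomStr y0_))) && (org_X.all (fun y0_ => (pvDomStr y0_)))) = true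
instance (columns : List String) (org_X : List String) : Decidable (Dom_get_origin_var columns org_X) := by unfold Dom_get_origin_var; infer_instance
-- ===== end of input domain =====

-- B replaces A's per-column scan of org_X by a first-occurrence index of org_X built once
-- plus an enumeration of the underscore-boundary prefixes of each suffix (objective: faster, measured).
-- col.split('__', 1)[-1] — identical in both Pythons, so shared by both ports
def pvSuffix (col : String) : List Char :=
  (((PySem.Str.splitMax? col "__" 1).getD []).getLast?.getD "").toList

-- ===== PORT A =====
-- A's inner `for org_var in org_X: … break` loop
def pvAFind (suffix : List Char) : List String → String
  | [] => "Unknown"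
  | v :: rest =>
      if PySem.Chars.startswith suffix (v.toList ++ ['_']) || suffix == v.toList then v
      else pvAFind suffix rest

def get_origin_var (columns : List String) (org_X : List String) : List String :=
  columns.foldl (fun l col => l ++ [pvAFind (pvSuffix col) org_X]) []

-- ===== PORT B =====
-- first loop of B: idx[v] = first position of v in org_X
def pvBIdx : List String → Nat → PySem.Dict String Nat → PySem.Dict String Nat
  | [], _, d => d
  | v :: rest, i, d => pvBIdx rest (i + 1) (if d.contains v then d else d.insert v i)

-- [suffix[:i] for i, ch in enumerate(suffix) if ch == '_'] + [suffix]
def pvBCands (s : List Char) : List (List Char) :=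
  (s.zipIdx.filterMap (fun p => if p.1 = '_' then some (s.take p.2) else none)) ++ [s]

-- B's _resolve helper
def pvBResolve (s : List Char) (org_X : List String) (idx : PySem.Dict String Nat) : String :=
  let hits := (pvBCands s).filterMap (fun c => idx.get? (String.ofList c))
  match hits.min? with
  | some k => org_X.getD k "Unknown"
  | none => "Unknown"

def get_origin_var_alt (columns : List String) (org_X : List String) : List String :=
  let idx := pvBIdx org_X 0 PySem.Dict.empty
  columns.map (fun col => pvBResolve (pvSuffix col) org_X idx)

-- ===== PRECONDITION & SPEC =====
def Spec_get_origin_var (columns : List String) (org_X : List String) (out : List String) : Prop := out = get_origin_var_alt columns org_X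
instance (columns : List String) (org_X : List String) (out : List String) : Decidable (Spec_get_origin_var columns org_X out) := by unfold Spec_get_origin_var; infer_instance

-- ===== CLAIM (what is proved, stated in full; the proofs are below) =====
def Claim_equal_get_origin_var : Prop := ∀ (columns : List String) (org_X : List String), Dom_get_origin_var columns org_X → Spec_get_origin_var columns org_X (get_origin_var columns org_X)

-- ===== LEMMAS AND PROOFS =====

-- the index dict looks up the first occurrence position
theorem pvBIdx_get? (l : List String) (i : Nat) (d : PySem.Dict String Nat) (v : String) :
    (pvBIdx l i d).get? v =
      if d.contains v then d.get? v else (PySem.List.index? l v).map (· + i) := by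
  induction l generalizing i d with
  | nil =>
      simp only [pvBIdx, PySem.List.index?_eq_idxOf?, List.idxOf?_nil, Option.map_none]
      rw [PySem.Dict.contains_eq_isSome_get?]
      cases h : d.get? v <;> simp
  | cons u rest ih =>
      simp only [pvBIdx]
      rw [ih]
      by_cases huv : u = v
      · subst huv
        rw [PySem.List.index?_cons_self]
        by_cases hc : d.contains u
        · simp [hc]
        · simp [hc]
      · rw [PySem.List.index?_cons_of_ne rest huv]
        have hvu : (v == u) = false := by simp [Ne.symm huv]
        by_cases hc : d.contains u
        · rw [if_pos hc]
          by_cases hv : d.contains v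
          · simp [hv]
          · simp only [hv, Option.map_map]
            cases PySem.List.index? rest v
            · simp
            · simp; omega
        · rw [if_neg hc]
          rw [PySem.Dict.contains_insert, hvu, Bool.false_or, PySem.Dict.get?_insert]
          by_cases hv : d.contains v
          · simp [hv, Ne.symm huv]
          · simp only [hv, if_neg (Ne.symm huv), Option.map_map]
            cases PySem.List.index? rest v
            · simp
            · simp; omega

-- A's match condition holds exactly on B's candidate prefixes
theorem pvCand_iff (s : List Char) (v : String) :
    v.toList ∈ pvBCands s ↔
      (PySem.Chars.startswith s (v.toList ++ ['_']) || s == v.toList) = true := by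
  constructor
  · intro h
    simp only [pvBCands, List.mem_append, List.mem_filterMap, List.mem_singleton] at h
    rcases h with ⟨⟨c, i⟩, hmem, hc⟩ | heq
    · split_ifs at hc with hu
      · injection hc with hc
        subst hu
        have hgi : s[i]? = some '_' := (List.mk_mem_zipIdx_iff_getElem?).mp hmem
        have hpre : v.toList ++ ['_'] <+: s := by
          have : s.take (i + 1) = s.take i ++ ['_'] := by
            rw [List.take_add_one, hgi]; rfl
          rw [← hc, ← this]
          exact List.take_prefix _ _
        simp [PySem.Chars.startswith_iff, hpre]
    · simp [heq]
  · intro h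
    simp only [Bool.or_eq_true] at h
    rcases h with h | h
    · have hpre : v.toList ++ ['_'] <+: s := (PySem.Chars.startswith_iff s _).mp h
      obtain ⟨t, ht⟩ := hpre
      have hi : s[v.toList.length]? = some '_' := by
        rw [← ht]
        simp
      have htake : s.take v.toList.length = v.toList := by
        rw [← ht]
        simp
      simp only [pvBCands, List.mem_append, List.mem_filterMap]
      exact Or.inl ⟨('_', v.toList.length), (List.mk_mem_zipIdx_iff_getElem?).mpr hi,
        by rw [if_pos rfl, htake]⟩
    · simp only [beq_iff_eq] at h
      simp [pvBCands, h]

theorem pvFoldlMin_succ (l : List Nat) : ∀ a : Nat, (l.map (· + 1)).foldl min (a + 1) = l.foldl min a + 1 := by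
  induction l with
  | nil => intro a; simp
  | cons b l ih =>
      intro a
      rw [List.map_cons, List.foldl_cons, List.foldl_cons, Nat.add_min_add_right]
      exact ih (min a b)

theorem pvMin?_map_succ (l : List Nat) : (l.map (· + 1)).min? = l.min?.map (· + 1) := by
  cases l with
  | nil => simp
  | cons a l =>
      rw [List.map_cons, List.min?_cons', List.min?_cons', pvFoldlMin_succ, Option.map_some]

theorem pvMin?_eq_zero_of_mem (l : List Nat) (h : 0 ∈ l) : l.min? = some 0 := by
  rw [List.min?_eq_some_iff]
  exact ⟨h, fun b _ => Nat.zero_le b⟩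

-- core: A's first-match scan equals B's min-over-candidate-first-occurrences
theorem pvAFind_eq_aux (s : List Char) (l : List String) :
    pvAFind s l =
      (match ((pvBCands s).filterMap (fun c => PySem.List.index? l (String.ofList c))).min? with
       | some k => l.getD k "Unknown"
       | none => "Unknown") := by
  induction l with
  | nil =>
      simp [pvAFind, PySem.List.index?_eq_idxOf?]
  | cons v rest ih =>
      by_cases h : (PySem.Chars.startswith s (v.toList ++ ['_']) || s == v.toList) = true
      · have hmem : v.toList ∈ pvBCands s := (pvCand_iff s v).mpr h
        have h0 : (0 : Nat) ∈ (pvBCands s).filterMap (fun c => PySem.List.index? (v :: rest) (String.ofList c)) := by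
          rw [List.mem_filterMap]
          exact ⟨v.toList, hmem, by rw [String.ofList_toList]; exact PySem.List.index?_cons_self v rest⟩
        rw [pvAFind, if_pos h, pvMin?_eq_zero_of_mem _ h0]
        rfl
      · have hne : ∀ c ∈ pvBCands s, String.ofList c ≠ v := by
          intro c hc hcv
          have : c = v.toList := by rw [← hcv, String.toList_ofList]
          exact h ((pvCand_iff s v).mp (this ▸ hc))
        have hfm : (pvBCands s).filterMap (fun c => PySem.List.index? (v :: rest) (String.ofList c))
            = ((pvBCands s).filterMap (fun c => PySem.List.index? rest (String.ofList c))).map (· + 1) := by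
          rw [List.map_filterMap]
          apply List.filterMap_congr
          intro c hc
          rw [PySem.List.index?_cons_of_ne rest (fun e => hne c hc e.symm)]
        rw [pvAFind, if_neg h, hfm, pvMin?_map_succ, ih]
        cases ((pvBCands s).filterMap (fun c => PySem.List.index? rest (String.ofList c))).min? <;> simp

theorem pvAFind_eq_resolve (s : List Char) (l : List String) :
    pvAFind s l = pvBResolve s l (pvBIdx l 0 PySem.Dict.empty) := by
  rw [pvBResolve, pvAFind_eq_aux]
  have : ((pvBCands s).filterMap (fun c => (pvBIdx l 0 PySem.Dict.empty).get? (String.ofList c)))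
      = (pvBCands s).filterMap (fun c => PySem.List.index? l (String.ofList c)) := by
    apply List.filterMap_congr
    intro c _
    rw [pvBIdx_get? l 0 PySem.Dict.empty (String.ofList c)]
    simp [PySem.Dict.contains_empty]
  simp only [this]

-- ===== VERDICT (by name: the statement is the Claim_ definition above) =====
theorem get_origin_var_spec : Claim_equal_get_origin_var := by
  intro columns org_X _
  unfold Spec_get_origin_var get_origin_var get_origin_var_alt
  rw [PySem.List.foldl_append_singleton_eq_map, List.nil_append]
  exact List.map_congr_left fun col _ => pvAFind_eq_resolve (pvSuffix col) org_X
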